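-- pv_equiv track=rewrite | github.com/kissiel/simple_translate | translate.py | translate_line
-- ===== SOURCE A (Python) =====
-- def translate_line(line, dic):
--     for key in sorted(dic.keys(), key=lambda x: len(x), reverse=True):
--         if line.find(key) >= 1:
--             if key == dic[key]:
--                 continue
--             translated = line.replace(key, dic[key])
--             return translate_line(translated, dic)
--     return line
-- ===== SOURCE B (Python) =====
-- def translate_line(line, dic):
--     # Iterative restart loop instead of tail recursion; the longest-first key
--     # order is computed once and the keys that map to themselves are filtered
--     # out once, instead of being re-sorted / re-skipped on every pass.
--     keys = [k for k in sorted(dic, key=len, reverse=True) if k != dic[k]]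
--     while True:
--         for key in keys:
--             if line.find(key) >= 1:
--                 line = line.replace(key, dic[key])
--                 break
--         else:
--             return line
-- ===== Notes on version B (the rewrite author's own statement) =====
-- stated objective: alternative
-- what changed: The tail recursion is replaced by an iterative restart loop, with the longest-first key order computed once and self-mapping keys filtered out once up front, instead of re-sorting the keys and re-testing key == dic[key] on every recursive call.
-- outside the precondition, e.g. on translate_line('a', {'a': 'b', 'b': 'a'}): A returns 'a', B returns 'a'
import Mathlib
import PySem

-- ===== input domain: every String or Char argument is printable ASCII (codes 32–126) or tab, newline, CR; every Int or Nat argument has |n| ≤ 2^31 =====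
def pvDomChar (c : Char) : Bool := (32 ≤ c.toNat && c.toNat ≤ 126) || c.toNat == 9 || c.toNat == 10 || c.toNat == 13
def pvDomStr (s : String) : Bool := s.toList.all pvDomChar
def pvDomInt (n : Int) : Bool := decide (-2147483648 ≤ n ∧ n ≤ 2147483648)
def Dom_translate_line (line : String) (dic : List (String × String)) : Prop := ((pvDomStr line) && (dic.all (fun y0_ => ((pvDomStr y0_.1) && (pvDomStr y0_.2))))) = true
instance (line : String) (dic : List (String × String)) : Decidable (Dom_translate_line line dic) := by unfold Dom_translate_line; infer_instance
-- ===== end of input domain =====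

-- B replaces A's tail recursion (which re-sorts the keys and re-tests key == dic[key]
-- every call) by an iterative restart loop over a once-sorted, once-filtered key list.
-- Both ports carry the same fuel bound, which merely totalises the same computation;
-- Pre_ excludes inputs on which the rewriting can cycle (Python A raises
-- RecursionError there and Python B does not terminate).

-- shared fuel bound (totalisation only; Python A's own recursion limit means any
-- input on which Python A returns uses fewer rounds than this)
def pvFuel (line : String) (dic : List (String × String)) : Nat :=
  line.toList.length + dic.length + 2000

-- ===== PORT A =====
-- the for-loop body of A: first key with line.find(key) >= 1; `continue` when
-- key == dic[key], otherwise return the replaced line (some); none = loop fell through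
def pvScanA (line : String) (d : PySem.Dict String String) : List String → Option String
  | [] => none
  | k :: ks =>
    if PySem.Str.find line k ≥ 1 then
      if k = d.getD k "" then pvScanA line d ks     -- dic[k]: k ∈ keys, so getD is exact
      else some (PySem.Str.replace line k (d.getD k ""))
    else pvScanA line d ks

def pvLoopA (d : PySem.Dict String String) : Nat → String → String
  | 0, line => line
  | f + 1, line =>
    -- sorted(dic.keys(), key=lambda x: len(x), reverse=True), recomputed each call as in A
    match pvScanA line d (PySem.List.sorted d.keys (fun x => PySem.Str.len x) true) with
    | none => line
    | some translated => pvLoopA d f translated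

def translate_line (line : String) (dic : List (String × String)) : String :=
  pvLoopA (PySem.Dict.ofList dic) (pvFuel line dic) line

-- ===== PORT B =====
-- keys = [k for k in sorted(dic, key=len, reverse=True) if k != dic[k]]
def pvKeysB (d : PySem.Dict String String) : List String :=
  (PySem.List.sorted d.keys (fun x => PySem.Str.len x) true).filter
    (fun k => k != d.getD k "")

-- the inner for-loop of B: first key with line.find(key) >= 1 (None = for-else)
def pvHitB (line : String) : List String → Option String
  | [] => none
  | k :: ks => if PySem.Str.find line k ≥ 1 then some k else pvHitB line ks

def pvLoopB (d : PySem.Dict String String) (keys : List String) : Nat → String → String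
  | 0, line => line
  | f + 1, line =>
    match pvHitB line keys with
    | none => line
    | some k => pvLoopB d keys f (PySem.Str.replace line k (d.getD k ""))

def translate_line_alt (line : String) (dic : List (String × String)) : String :=
  let d := PySem.Dict.ofList dic
  pvLoopB d (pvKeysB d) (pvFuel line dic) line

-- ===== PRECONDITION & SPEC =====
-- helpers for Pre_: a substring-occurrence graph on the dictionary, checked
-- without running either algorithm.

-- the pairs that can ever cause a replacement: key ≠ value and key nonempty
def pvActive (dic : List (String × String)) : List (String × String) :=
  (PySem.Dict.ofList dic).items.filter (fun p => p.1 != p.2 && p.1 != "")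

-- keys reachable from the line: start with active keys occurring in the line,
-- then close under "this key occurs in the value of an already reachable pair"
def pvReachStep (act : List (String × String)) (S : List String) : List String :=
  S ++ (act.filter (fun q => !(S.contains q.1) &&
          act.any (fun p => S.contains p.1 && PySem.Str.isIn q.1 p.2))).map Prod.fst

def pvReachIter (act : List (String × String)) : Nat → List String → List String
  | 0, S => S
  | n + 1, S => pvReachIter act n (pvReachStep act S)

def pvReach (line : String) (dic : List (String × String)) : List String :=
  pvReachIter (pvActive dic) (pvActive dic).length
    (((pvActive dic).filter (fun p => PySem.Str.isIn p.1 line)).map Prod.fst)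

-- acyclicity of the occurs-in-value relation by repeated removal of sinks
def pvPrune (l : List (String × String)) : List (String × String) :=
  l.filter (fun p => l.any (fun q => PySem.Str.isIn q.1 p.2))

def pvPruneIter : Nat → List (String × String) → List (String × String)
  | 0, l => l
  | n + 1, l => pvPruneIter n (pvPrune l)

-- Pre_ excludes inputs whose active, line-reachable dictionary pairs contain a cycle of
-- the key-occurs-in-value relation: on those the rewriting can cascade without bound and
-- Python A raises RecursionError (e.g. ' a' with {'a':'b','b':'a'}); on the excluded
-- corner where such a cycle is present but never fires, A returns the line unchanged
-- and B agrees (see cites).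
def Pre_translate_line (line : String) (dic : List (String × String)) : Prop :=
  pvPruneIter ((pvActive dic).filter (fun p => (pvReach line dic).contains p.1)).length
    ((pvActive dic).filter (fun p => (pvReach line dic).contains p.1)) = []
instance (line : String) (dic : List (String × String)) : Decidable (Pre_translate_line line dic) := by unfold Pre_translate_line; infer_instance

def pvWitness_translate_line : String × (List (String × String)) :=
  ("hello world", [("world", "there"), ("cat", "cat")])

def Spec_translate_line (line : String) (dic : List (String × String)) (out : String) : Prop := out = translate_line_alt line dic
instance (line : String) (dic : List (String × String)) (out : String) : Decidable (Spec_translate_line line dic out) := by unfold Spec_translate_line; infer_instance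

-- ===== CLAIM (what is proved, stated in full; the proofs are below) =====
def Claim_equal_translate_line : Prop := ∀ (line : String) (dic : List (String × String)), Dom_translate_line line dic → Pre_translate_line line dic → Spec_translate_line line dic (translate_line line dic)

-- ===== LEMMAS AND PROOFS =====

-- A's scan over a key list = B's hit on the filtered list, followed by the replacement
theorem pvScanA_eq_hitB (line : String) (d : PySem.Dict String String) (ks : List String) :
    pvScanA line d ks =
      (pvHitB line (ks.filter (fun k => k != d.getD k ""))).map
        (fun k => PySem.Str.replace line k (d.getD k "")) := by
  induction ks with
  | nil => rfl
  | cons k ks ih =>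
    simp only [pvScanA, List.filter_cons]
    by_cases hk : k = d.getD k ""
    · have hb : (k != d.getD k "") = false := by simp only [bne_eq_false_iff_eq]; exact hk
      rw [hb]
      simp only [Bool.false_eq_true, if_false, if_pos hk, ite_self]
      exact ih
    · have hb : (k != d.getD k "") = true := by simp only [bne_iff_ne]; exact hk
      rw [hb]
      simp only [if_true, pvHitB, if_neg hk]
      by_cases hf : PySem.Str.find line k ≥ 1
      · rw [if_pos hf, if_pos hf]; rfl
      · rw [if_neg hf, if_neg hf]; exact ih

-- the two fueled loops agree step for step
theorem pvLoopA_eq_pvLoopB (d : PySem.Dict String String) (f : Nat) (line : String) :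
    pvLoopA d f line = pvLoopB d (pvKeysB d) f line := by
  induction f generalizing line with
  | zero => rfl
  | succ f ih =>
    simp only [pvLoopA, pvLoopB, pvKeysB,
      pvScanA_eq_hitB line d (PySem.List.sorted d.keys (fun x => PySem.Str.len x) true)]
    cases pvHitB line ((PySem.List.sorted d.keys (fun x => PySem.Str.len x) true).filter
        (fun k => k != d.getD k "")) with
    | none => rfl
    | some k => exact ih _

-- ===== VERDICT (by name: the statement is the Claim_ definition above) =====
theorem translate_line_spec : Claim_equal_translate_line := by
  intro line dic _ _
  unfold Spec_translate_line translate_line translate_line_alt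
  exact pvLoopA_eq_pvLoopB _ _ _
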